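-- pv_equiv track=rewrite | github.com/ru-fu/aoc | aoc2024/day25.py | convert
-- ===== SOURCE A (Python) =====
-- def convert(which):
--
--   val = []
--   vals = []
--
--   for one in which:
--     for i in range(len(one[0])):
--       count = 0
--       for line in one:
--         if line[i] == "#":
--           count += 1
--       val.append(count)
--       count = 0
--
--     vals.append(tuple(val))
--     val = []
--
--   return vals
-- ===== SOURCE B (Python) =====
-- def convert(which):
--   def fold_grid(one):
--     counts = [0] * len(one[0])
--     for line in one:
--       counts = [c + (ch == "#") for c, ch in zip(counts, line)]
--     return tuple(counts)
--   return [fold_grid(one) for one in which]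
-- ===== Notes on version B (the rewrite author's own statement) =====
-- stated objective: alternative
-- what changed: Instead of A's column-major scan (for each column index, rescan all rows counting '#'), B makes a single row-major pass per grid, folding each row into a running per-column counts vector via zip, so the inner rescan of the rows per column disappears.
import Mathlib
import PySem

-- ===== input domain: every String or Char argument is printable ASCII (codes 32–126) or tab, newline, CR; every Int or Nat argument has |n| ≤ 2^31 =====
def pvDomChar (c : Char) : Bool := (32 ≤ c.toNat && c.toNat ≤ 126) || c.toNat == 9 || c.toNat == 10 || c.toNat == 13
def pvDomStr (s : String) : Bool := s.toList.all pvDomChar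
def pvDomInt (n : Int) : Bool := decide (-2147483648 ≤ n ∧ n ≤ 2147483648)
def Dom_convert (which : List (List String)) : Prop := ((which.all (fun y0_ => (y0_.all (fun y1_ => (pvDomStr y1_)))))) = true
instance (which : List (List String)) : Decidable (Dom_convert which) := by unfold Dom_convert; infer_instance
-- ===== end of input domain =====

-- B replaces A's column-major scan (for each column index, rescan all rows) by a single
-- row-major pass per grid that folds each row into a running per-column counts vector (alternative, same cost).

-- ===== PORT A =====
-- literal transliteration of A: outer foldl over grids, per grid a foldl over range(len(one[0]))
-- appending one count per column, the count itself a foldl over the grid's lines with an if-counter.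
-- one[0] is ported as one.headD "" and line[i] via pyGet?; Pre_convert keeps exactly the inputs
-- where Python's indexing succeeds, where these are exact.
def convert (which : List (List String)) : List (List Int) :=
  which.foldl (fun vals one =>
    vals ++ [(PySem.List.pyRange 0 (PySem.Str.len (one.headD "")) 1).foldl
      (fun val i =>
        val ++ [one.foldl
          (fun count line => if PySem.Str.pyGet? line i == some '#' then count + 1 else count)
          (0 : Int)])
      []]) []

-- ===== PORT B =====
-- transliteration of B: per grid, counts = [0]*len(one[0]) (replicate; exact under Pre_convert where
-- one[0] exists), then fold over the lines, each step being the comprehension over zip(counts, line);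
-- the outer list comprehension over which is a map.
def convert_alt (which : List (List String)) : List (List Int) :=
  which.map (fun one =>
    one.foldl
      (fun counts line =>
        (counts.zip line.toList).map (fun p => p.1 + (if p.2 == '#' then (1 : Int) else 0)))
      (List.replicate (PySem.Str.len (one.headD "")).toNat (0 : Int)))

-- ===== PRECONDITION & SPEC =====
-- Pre_ excludes exactly the inputs on which the Python A raises IndexError: a grid with no rows
-- (one[0] fails) or a grid with a row shorter than its first row (line[i] fails).
def Pre_convert (which : List (List String)) : Prop :=
  ∀ one ∈ which, one ≠ [] ∧ ∀ line ∈ one, (one.headD "").toList.length ≤ line.toList.length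
instance (which : List (List String)) : Decidable (Pre_convert which) := by
  unfold Pre_convert; infer_instance
def pvWitness_convert : List (List String) := [["#.", ".#", "##"], ["..#"]]

def Spec_convert (which : List (List String)) (out : List (List Int)) : Prop := out = convert_alt which
instance (which : List (List String)) (out : List (List Int)) : Decidable (Spec_convert which out) := by unfold Spec_convert; infer_instance

-- ===== CLAIM (what is proved, stated in full; the proofs are below) =====
def Claim_equal_convert : Prop := ∀ (which : List (List String)), Dom_convert which → Pre_convert which → Spec_convert which (convert which)

-- ===== LEMMAS AND PROOFS =====

-- the per-column 0/1 indicator both sides count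
def pvInd (line : String) (k : Nat) : Int :=
  if line.toList.getD k ' ' == '#' then 1 else 0

-- B's row-major fold, started from any counts vector short enough for every line,
-- equals: entrywise, the start value plus the column's total indicator sum.
lemma pv_fold_rows (one : List String) :
    ∀ (cs : List Int), (∀ line ∈ one, cs.length ≤ line.toList.length) →
    one.foldl
      (fun counts line =>
        (counts.zip line.toList).map (fun p => p.1 + (if p.2 == '#' then (1 : Int) else 0)))
      cs
    = (List.range cs.length).map (fun k => cs.getD k 0 + (one.map (fun line => pvInd line k)).sum) := by
  induction one with
  | nil =>
      intro cs _
      simp only [List.foldl_nil, List.map_nil, List.sum_nil, add_zero]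
      apply List.ext_getElem (by simp)
      intro i h1 h2
      simp only [List.getElem_map, List.getElem_range]
      exact (List.getD_eq_getElem cs 0 (by simpa using h2)).symm
  | cons line rest ih =>
      intro cs hlen
      have hline : cs.length ≤ line.toList.length := hlen line (List.mem_cons_self ..)
      have hstep : ((cs.zip line.toList).map
          (fun p => p.1 + (if p.2 == '#' then (1 : Int) else 0))).length = cs.length := by
        have hline2 : cs.length ≤ line.length := by simpa using hline
        simp; omega
      rw [List.foldl_cons, ih _ (by intro l hl; rw [hstep]; exact hlen l (List.mem_cons_of_mem _ hl))]
      rw [hstep]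
      apply List.map_congr_left
      intro k hk
      have hk' : k < cs.length := List.mem_range.mp hk
      have hk2 : k < line.toList.length := lt_of_lt_of_le hk' hline
      rw [List.getD_eq_getElem _ _ (hstep ▸ hk')]
      simp only [List.getElem_map, List.getElem_zip, List.map_cons, List.sum_cons]
      rw [List.getD_eq_getElem cs 0 hk']
      have : pvInd line k = if line.toList[k] == '#' then (1 : Int) else 0 := by
        simp [pvInd, List.getElem?_eq_getElem hk2]
      rw [this]; ring

-- A's if-counter fold over the lines equals the indicator sum, when k is in range for every line.
lemma pv_colA (k : Nat) (one : List String)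
    (hk : ∀ line ∈ one, k < line.toList.length) : ∀ (init : Int),
    one.foldl (fun count line => if PySem.Str.pyGet? line (k : Int) == some '#' then count + 1 else count) init
      = init + (one.map (fun line => pvInd line k)).sum := by
  induction one with
  | nil => intro init; simp
  | cons line rest ih =>
      intro init
      have hlt := hk line (List.mem_cons_self ..)
      rw [List.foldl_cons, ih (fun l hl => hk l (List.mem_cons_of_mem _ hl))]
      simp only [List.map_cons, List.sum_cons]
      have : (if PySem.Str.pyGet? line (k : Int) == some '#' then init + 1 else init)
          = init + pvInd line k := by
        simp only [pvInd, PySem.Str.pyGet?, PySem.Chars.pyGet?, PySem.List.pyGet?_natCast,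
          List.getElem?_eq_getElem hlt, List.getD_eq_getElem?_getD, Option.getD_some]
        split_ifs <;> simp_all
      rw [this]; ring

-- ===== VERDICT (by name: the statement is the Claim_ definition above) =====
theorem convert_spec : Claim_equal_convert := by
  intro which _ hpre
  unfold Spec_convert convert convert_alt
  rw [PySem.List.foldl_append_singleton_eq_map, List.nil_append]
  apply List.map_congr_left
  intro one hone
  obtain ⟨hne, hlen⟩ := hpre one hone
  have hWlen : PySem.Str.len (one.headD "") = ((one.headD "").toList.length : Int) := by
    simp [PySem.Str.len_eq]
  rw [PySem.List.foldl_append_singleton_eq_map, List.nil_append, hWlen]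
  rw [pv_fold_rows one _ (by intro l hl; simpa using hlen l hl)]
  rw [PySem.List.pyRange_zero_natCast]
  simp only [List.length_replicate, Int.toNat_natCast, List.map_map, Function.comp_def]
  apply List.map_congr_left
  intro k hk
  have hk' : k < (one.headD "").toList.length := List.mem_range.mp hk
  rw [pv_colA k one (fun l hl => lt_of_lt_of_le hk' (hlen l hl)) 0]
  simp only [List.getD_eq_getElem?_getD, List.getElem?_replicate]
  split <;> simp
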